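-- pv_equiv track=rewrite | github.com/bureksirovic-web/recepti | translate_batch.py | parse_translated_batch
-- ===== SOURCE A (Python) =====
-- def parse_translated_batch(raw_text, count):
--     blocks = []
--     current = None
--     for line in raw_text.strip().splitlines():
--         line = line.rstrip()
--         if line.lower().startswith("name:"):
--             if current is not None:
--                 blocks.append(current)
--             current = {"name": line.split(":", 1)[1].strip(), "description": ""}
--         elif line.lower().startswith("description:"):
--             if current is not None:
--                 current["description"] = line.split(":", 1)[1].strip()
--         elif current is not None:
--             if current["description"]:
--                 current["description"] += " " + line.strip()
--             elif current["name"]: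
--                 current["description"] = line.strip()
--     if current is not None:
--         blocks.append(current)
--
--     if len(blocks) < count:
--         blocks = []
--         parts = raw_text.strip().split("\n\n")
--         for p in parts:
--             p = p.strip()
--             if not p:
--                 continue
--             name_val, desc_val = "", ""
--             for lp in p.splitlines():
--                 lp_lower = lp.lower()
--                 if lp_lower.startswith("name:"):
--                     name_val = lp.split(":", 1)[1].strip()
--                 elif lp_lower.startswith("description:"):
--                     desc_val = lp.split(":", 1)[1].strip()
--             if name_val or desc_val:
--                 blocks.append({"name": name_val, "description": desc_val})
--
--     while len(blocks) < count:
--         blocks.append({"name": "", "description": ""})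
--
--     return blocks[:count]
-- ===== SOURCE B (Python) =====
-- def _is_name(line):
--     return line.lower().startswith("name:")
--
--
-- def _after_colon(line):
--     return line.split(":", 1)[1].strip()
--
--
-- def _groups(lines):
--     """Split rstripped lines into groups, one per 'name:' header; lines before
--     the first header are dropped."""
--     if not lines:
--         return []
--     head, rest = lines[0], lines[1:]
--     if not _is_name(head):
--         return _groups(rest)
--     k = 0
--     while k < len(rest) and not _is_name(rest[k]):
--         k += 1
--     return [[head] + rest[:k]] + _groups(rest[k:])
--
--
-- def _block(group):
--     name = _after_colon(group[0])
--     desc = ""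
--     for line in group[1:]:
--         if line.lower().startswith("description:"):
--             desc = _after_colon(line)
--         elif desc:
--             desc += " " + line.strip()
--         elif name:
--             desc = line.strip()
--     return {"name": name, "description": desc}
--
--
-- def _part_block(p):
--     name_val, desc_val = "", ""
--     for lp in p.splitlines():
--         lp_lower = lp.lower()
--         if lp_lower.startswith("name:"):
--             name_val = _after_colon(lp)
--         elif lp_lower.startswith("description:"):
--             desc_val = _after_colon(lp)
--     if name_val or desc_val:
--         return {"name": name_val, "description": desc_val}
--     return None
--
--
-- def parse_translated_batch(raw_text, count):
--     lines = [l.rstrip() for l in raw_text.strip().splitlines()]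
--     blocks = [_block(g) for g in _groups(lines)]
--     if len(blocks) < count:
--         parts = [q for q in (p.strip() for p in raw_text.strip().split("\n\n")) if q]
--         blocks = [b for b in (_part_block(q) for q in parts) if b is not None]
--     blocks += [{"name": "", "description": ""}] * max(0, count - len(blocks))
--     return blocks[:count]
-- ===== Notes on version B (the rewrite author's own statement) =====
-- stated objective: alternative
-- what changed: Replaced A's single stateful line loop carrying (blocks, current-optional-dict) by a group-then-map decomposition: split the rstripped lines into groups at each 'name:' header (dropping lines before the first), map each group to its block with a per-group description fold, and replaced the fallback's fold-with-append by filter+map over parts and the while-pad loop by a computed replicate.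
import Mathlib
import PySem

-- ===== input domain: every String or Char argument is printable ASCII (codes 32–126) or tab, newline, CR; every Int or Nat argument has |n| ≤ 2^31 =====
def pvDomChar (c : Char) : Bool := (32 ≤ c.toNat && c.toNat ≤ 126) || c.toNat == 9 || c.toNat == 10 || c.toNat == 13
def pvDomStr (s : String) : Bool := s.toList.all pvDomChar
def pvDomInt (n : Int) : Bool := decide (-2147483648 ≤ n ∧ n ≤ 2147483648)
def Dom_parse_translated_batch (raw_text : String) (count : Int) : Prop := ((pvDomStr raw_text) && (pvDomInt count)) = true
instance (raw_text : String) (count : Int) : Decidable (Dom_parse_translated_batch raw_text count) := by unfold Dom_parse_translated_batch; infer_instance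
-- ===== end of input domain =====

-- B restructures A's single stateful line loop into group-then-map (split lines at 'name:' headers,
-- map each group to a block) and replaces the fold-with-append fallback and while-pad by
-- filter/filterMap and replicate; objective: simpler decomposition, same results.

-- ===== PORT A =====
-- loop state: (blocks so far, current block as optional (name, description))
def pvA_step (st : List (List (String × String)) × Option (String × String)) (line0 : String) :
    List (List (String × String)) × Option (String × String) :=
  let line := PySem.Str.rstrip line0
  if PySem.Str.startswith (PySem.Str.lower line) "name:" then
    (match st.2 with
      | none => st.1
      | some c => st.1 ++ [[("name", c.1), ("description", c.2)]],
     some (PySem.Str.strip (((PySem.Str.splitMax? line ":" 1).getD []).getD 1 ""), ""))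
  else if PySem.Str.startswith (PySem.Str.lower line) "description:" then
    (st.1, match st.2 with
      | none => none
      | some c => some (c.1, PySem.Str.strip (((PySem.Str.splitMax? line ":" 1).getD []).getD 1 "")))
  else
    match st.2 with
    | none => st
    | some c =>
      if c.2 ≠ "" then (st.1, some (c.1, c.2 ++ " " ++ PySem.Str.strip line))
      else if c.1 ≠ "" then (st.1, some (c.1, PySem.Str.strip line))
      else st

-- inner loop of the fallback branch ('for lp in p.splitlines(): …'), state (name_val, desc_val)
def pvA_partStep (st : String × String) (lp : String) : String × String :=
  let lpl := PySem.Str.lower lp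
  if PySem.Str.startswith lpl "name:" then
    (PySem.Str.strip (((PySem.Str.splitMax? lp ":" 1).getD []).getD 1 ""), st.2)
  else if PySem.Str.startswith lpl "description:" then
    (st.1, PySem.Str.strip (((PySem.Str.splitMax? lp ":" 1).getD []).getD 1 ""))
  else st

-- fallback branch: blocks rebuilt from raw_text.strip().split("\n\n")
def pvA_fallback (raw_text : String) : List (List (String × String)) :=
  ((PySem.Str.split? (PySem.Str.strip raw_text) "\n\n").getD []).foldl
    (fun blocks p0 =>
      let p := PySem.Str.strip p0
      if p = "" then blocks
      else
        let nd := (PySem.Str.splitlines p).foldl pvA_partStep ("", "")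
        if nd.1 ≠ "" ∨ nd.2 ≠ "" then blocks ++ [[("name", nd.1), ("description", nd.2)]]
        else blocks) []

-- 'while len(blocks) < count: blocks.append(…)'
def pvA_pad (blocks : List (List (String × String))) (count : Int) : List (List (String × String)) :=
  if _h : (blocks.length : Int) < count then
    pvA_pad (blocks ++ [[("name", ""), ("description", "")]]) count
  else blocks
termination_by (count - blocks.length).toNat
decreasing_by simp only [List.length_append, List.length_cons, List.length_nil]; omega

-- 'if current is not None: blocks.append(current)' after the loop
def pvA_finish (st : List (List (String × String)) × Option (String × String)) :
    List (List (String × String)) :=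
  match st.2 with
  | none => st.1
  | some c => st.1 ++ [[("name", c.1), ("description", c.2)]]

def parse_translated_batch (raw_text : String) (count : Int) : List (List (String × String)) :=
  let st := (PySem.Str.splitlines (PySem.Str.strip raw_text)).foldl pvA_step ([], none)
  let blocks := pvA_finish st
  let blocks := if (blocks.length : Int) < count then pvA_fallback raw_text else blocks
  PySem.List.slice (pvA_pad blocks count) none (some count)

-- ===== PORT B =====
def pvB_isName (line : String) : Bool := PySem.Str.startswith (PySem.Str.lower line) "name:"

def pvB_afterColon (line : String) : String :=
  PySem.Str.strip (((PySem.Str.splitMax? line ":" 1).getD []).getD 1 "")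

-- split lines into groups, one per 'name:' header; lines before the first header are dropped
def pvB_groups : List String → List (List String)
  | [] => []
  | head :: rest =>
    if pvB_isName head then
      (head :: rest.takeWhile (fun l => !pvB_isName l)) ::
        pvB_groups (rest.dropWhile (fun l => !pvB_isName l))
    else pvB_groups rest
termination_by ls => ls.length
decreasing_by
  · exact Nat.lt_succ_of_le (List.length_dropWhile_le _ _)
  · exact Nat.lt_succ_self _

def pvB_descStep (name : String) (desc : String) (line : String) : String :=
  if PySem.Str.startswith (PySem.Str.lower line) "description:" then pvB_afterColon line
  else if desc ≠ "" then desc ++ " " ++ PySem.Str.strip line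
  else if name ≠ "" then PySem.Str.strip line
  else desc

def pvB_block (group : List String) : List (String × String) :=
  match group with
  | [] => [("name", ""), ("description", "")]   -- unreachable: pvB_groups yields non-empty groups
  | head :: tail =>
    let name := pvB_afterColon head
    [("name", name), ("description", tail.foldl (pvB_descStep name) "")]

def pvB_partStep (st : String × String) (lp : String) : String × String :=
  let lpl := PySem.Str.lower lp
  if PySem.Str.startswith lpl "name:" then
    (pvB_afterColon lp, st.2)
  else if PySem.Str.startswith lpl "description:" then
    (st.1, pvB_afterColon lp)
  else st

def pvB_partBlock (p : String) : Option (List (String × String)) :=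
  let nd := (PySem.Str.splitlines p).foldl pvB_partStep ("", "")
  if nd.1 ≠ "" ∨ nd.2 ≠ "" then some [("name", nd.1), ("description", nd.2)] else none

def parse_translated_batch_alt (raw_text : String) (count : Int) : List (List (String × String)) :=
  let lines := (PySem.Str.splitlines (PySem.Str.strip raw_text)).map PySem.Str.rstrip
  let blocks := (pvB_groups lines).map pvB_block
  let blocks := if (blocks.length : Int) < count then
      ((((PySem.Str.split? (PySem.Str.strip raw_text) "\n\n").getD []).map PySem.Str.strip).filter
        (fun q => !(q == ""))).filterMap pvB_partBlock
    else blocks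
  let blocks := blocks ++ List.replicate (max 0 (count - blocks.length)).toNat [("name", ""), ("description", "")]
  PySem.List.slice blocks none (some count)

-- ===== PRECONDITION & SPEC =====
def Spec_parse_translated_batch (raw_text : String) (count : Int) (out : List (List (String × String))) : Prop := out = parse_translated_batch_alt raw_text count
instance (raw_text : String) (count : Int) (out : List (List (String × String))) : Decidable (Spec_parse_translated_batch raw_text count out) := by unfold Spec_parse_translated_batch; infer_instance

-- ===== CLAIM (what is proved, stated in full; the proofs are below) =====
def Claim_equal_parse_translated_batch : Prop := ∀ (raw_text : String) (count : Int), Dom_parse_translated_batch raw_text count → Spec_parse_translated_batch raw_text count (parse_translated_batch raw_text count)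

-- ===== LEMMAS AND PROOFS =====

-- A's step on an already-rstripped line
def pvA_step' (st : List (List (String × String)) × Option (String × String)) (line : String) :
    List (List (String × String)) × Option (String × String) :=
  if PySem.Str.startswith (PySem.Str.lower line) "name:" then
    (match st.2 with
      | none => st.1
      | some c => st.1 ++ [[("name", c.1), ("description", c.2)]],
     some (pvB_afterColon line, ""))
  else if PySem.Str.startswith (PySem.Str.lower line) "description:" then
    (st.1, match st.2 with
      | none => none
      | some c => some (c.1, pvB_afterColon line))
  else
    match st.2 with
    | none => st
    | some c =>
      if c.2 ≠ "" then (st.1, some (c.1, c.2 ++ " " ++ PySem.Str.strip line))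
      else if c.1 ≠ "" then (st.1, some (c.1, PySem.Str.strip line))
      else st

theorem pvA_step_eq (st : List (List (String × String)) × Option (String × String)) (l : String) :
    pvA_step st l = pvA_step' st (PySem.Str.rstrip l) := by
  simp [pvA_step, pvA_step', pvB_afterColon]

theorem pvA_foldl_map (ls : List String) (st : List (List (String × String)) × Option (String × String)) :
    ls.foldl pvA_step st = (ls.map PySem.Str.rstrip).foldl pvA_step' st := by
  rw [List.foldl_map]
  exact PySem.List.foldl_congr_mem _ _ _ _ (fun acc x _ => pvA_step_eq acc x)

theorem pvStep_skip (bs : List (List (String × String))) (l : String)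
    (hn : pvB_isName l = false) : pvA_step' (bs, none) l = (bs, none) := by
  unfold pvA_step' pvB_isName at *
  rw [hn]
  simp

theorem pvStep_name (bs : List (List (String × String))) (l : String)
    (hn : pvB_isName l = true) : pvA_step' (bs, none) l = (bs, some (pvB_afterColon l, "")) := by
  unfold pvA_step' pvB_isName at *
  rw [hn]
  simp

theorem pvStep_group (blocks : List (List (String × String))) (n d l : String)
    (hn : pvB_isName l = false) :
    pvA_step' (blocks, some (n, d)) l = (blocks, some (n, pvB_descStep n d l)) := by
  unfold pvA_step' pvB_isName at *
  rw [hn]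
  simp only [Bool.false_eq_true, if_false, pvB_descStep]
  split_ifs <;> simp_all

theorem pvFold_group (t : List String) (h : ∀ l ∈ t, pvB_isName l = false)
    (blocks : List (List (String × String))) (n d : String) :
    t.foldl pvA_step' (blocks, some (n, d)) = (blocks, some (n, t.foldl (pvB_descStep n) d)) := by
  induction t generalizing d with
  | nil => rfl
  | cons l t ih =>
    simp only [List.foldl_cons]
    rw [pvStep_group _ _ _ _ (h l (by simp))]
    exact ih (fun x hx => h x (by simp [hx])) _

theorem pvStep_emit (blocks : List (List (String × String))) (c : String × String) (l : String)
    (hn : pvB_isName l = true) :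
    pvA_step' (blocks, some c) l
      = pvA_step' (blocks ++ [[("name", c.1), ("description", c.2)]], none) l := by
  unfold pvA_step' pvB_isName at *
  rw [hn]
  simp

theorem pvDropWhile_head {α : Type} (p : α → Bool) :
    ∀ (l : List α) (x : α) (xs : List α), l.dropWhile p = x :: xs → p x = false := by
  intro l
  induction l with
  | nil => intro x xs h; simp at h
  | cons a t ih =>
    intro x xs h
    rw [List.dropWhile_cons] at h
    split at h
    · exact ih _ _ h
    · rename_i hpa
      cases h
      simpa using hpa

theorem pvMain (N : Nat) : ∀ ls : List String, ls.length ≤ N →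
    ∀ blocks : List (List (String × String)),
      pvA_finish (ls.foldl pvA_step' (blocks, none)) = blocks ++ (pvB_groups ls).map pvB_block := by
  induction N with
  | zero =>
    intro ls hls blocks
    have : ls = [] := List.length_eq_zero_iff.mp (Nat.le_zero.mp hls)
    subst this
    simp [pvA_finish, pvB_groups]
  | succ N ih =>
    intro ls hls blocks
    match ls with
    | [] => simp [pvA_finish, pvB_groups]
    | l :: rest =>
      simp only [List.length_cons, Nat.add_le_add_iff_right] at hls
      by_cases hn : pvB_isName l = true
      · rw [pvB_groups]
        simp only [hn, if_true, List.map_cons, List.foldl_cons]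
        rw [pvStep_name _ _ hn]
        conv_lhs => rw [← List.takeWhile_append_dropWhile (p := fun x => !pvB_isName x) (l := rest)]
        rw [List.foldl_append]
        rw [pvFold_group _ (fun x hx => by simpa using List.mem_takeWhile_imp hx)]
        cases hrr : rest.dropWhile (fun x => !pvB_isName x) with
        | nil =>
          simp [pvA_finish, pvB_block, pvB_groups]
        | cons r0 rs =>
          have hr0 : pvB_isName r0 = true := by
            simpa using pvDropWhile_head _ _ _ _ hrr
          rw [List.foldl_cons, pvStep_emit _ _ _ hr0, ← List.foldl_cons]
          have hlen : (r0 :: rs).length ≤ N := by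
            have h1 := List.length_dropWhile_le (fun x => !pvB_isName x) rest
            rw [hrr] at h1
            omega
          rw [ih (r0 :: rs) hlen]
          simp [pvB_block]
      · have hn' : pvB_isName l = false := by simpa using hn
        rw [pvB_groups]
        simp only [hn', Bool.false_eq_true, if_false, List.foldl_cons]
        rw [pvStep_skip _ _ hn']
        exact ih rest hls blocks

theorem pvFallback_eq (parts : List String) (acc : List (List (String × String))) :
    parts.foldl
      (fun blocks p0 =>
        let p := PySem.Str.strip p0
        if p = "" then blocks
        else
          let nd := (PySem.Str.splitlines p).foldl pvA_partStep ("", "")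
          if nd.1 ≠ "" ∨ nd.2 ≠ "" then blocks ++ [[("name", nd.1), ("description", nd.2)]]
          else blocks) acc
    = acc ++ ((parts.map PySem.Str.strip).filter (fun q => !(q == ""))).filterMap pvB_partBlock := by
  have hps : pvA_partStep = pvB_partStep := by
    funext st lp
    simp [pvA_partStep, pvB_partStep, pvB_afterColon]
  induction parts generalizing acc with
  | nil => simp
  | cons p ps ih =>
    simp only [List.foldl_cons, List.map_cons]
    by_cases hp : PySem.Str.strip p = ""
    · simp only [hp, if_true]
      rw [ih]
      simp
    · simp only [hp, if_false]
      rw [ih]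
      by_cases hc : ((PySem.Str.splitlines (PySem.Str.strip p)).foldl pvA_partStep ("", "")).1 ≠ ""
          ∨ ((PySem.Str.splitlines (PySem.Str.strip p)).foldl pvA_partStep ("", "")).2 ≠ ""
      · simp only [hc, if_true]
        simp [hp, pvB_partBlock, ← hps, hc]
      · simp only [hc, if_false]
        simp [hp, pvB_partBlock, ← hps, hc]

theorem pvFallback_eq' (raw_text : String) :
    pvA_fallback raw_text
      = ((((PySem.Str.split? (PySem.Str.strip raw_text) "\n\n").getD []).map PySem.Str.strip).filter
          (fun q => !(q == ""))).filterMap pvB_partBlock := by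
  unfold pvA_fallback
  rw [pvFallback_eq]
  simp

theorem pvPad_eq (blocks : List (List (String × String))) (count : Int) :
    pvA_pad blocks count
      = blocks ++ List.replicate (max 0 (count - blocks.length)).toNat [("name", ""), ("description", "")] := by
  fun_induction pvA_pad blocks count with
  | case1 blocks h ih =>
    rw [ih, List.append_assoc]
    congr 1
    have heq : (max 0 (count - blocks.length)).toNat
        = ((max 0 (count - (blocks ++ [[("name", ""), ("description", "")]]).length)).toNat) + 1 := by
      simp only [List.length_append, List.length_cons, List.length_nil]
      omega
    rw [heq, List.replicate_succ]
    simp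
  | case2 blocks h =>
    have heq : (max 0 (count - blocks.length)).toNat = 0 := by omega
    simp [heq]

-- ===== VERDICT (by name: the statement is the Claim_ definition above) =====
theorem parse_translated_batch_spec : Claim_equal_parse_translated_batch := by
  intro raw_text count _
  unfold Spec_parse_translated_batch
  simp only [parse_translated_batch, parse_translated_batch_alt]
  rw [pvA_foldl_map]
  have hb : pvA_finish (((PySem.Str.splitlines (PySem.Str.strip raw_text)).map PySem.Str.rstrip).foldl
        pvA_step' ([], none))
      = (pvB_groups ((PySem.Str.splitlines (PySem.Str.strip raw_text)).map PySem.Str.rstrip)).map pvB_block := by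
    simpa using pvMain ((PySem.Str.splitlines (PySem.Str.strip raw_text)).map PySem.Str.rstrip).length
      _ le_rfl []
  rw [hb, pvFallback_eq', pvPad_eq]
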